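-- pv_equiv track=rewrite | github.com/ddm-j/quasar | quasar/services/registry/mapper.py | _select_crypto_asset_for_provider
-- ===== SOURCE A (Python) =====
-- from typing import List, Dict, Optional, Tuple
--
-- def _select_crypto_asset_for_provider(provider_assets: List[Dict], preferred_quote: Optional[str]) -> Tuple[Optional[Dict], List[Dict], str]:
--     """Select which crypto asset to map for a provider based on preferences."""
--
--     # Count unique quote currencies
--     unique_quotes = set(a.get('quote_currency') for a in provider_assets if a.get('quote_currency'))
--
--     # If only one quote currency, map it (ignore preferences)
--     if len(unique_quotes) == 1:
--         selected = provider_assets[0]  # Just pick first (they're equivalent)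
--         return selected, [], f"Single quote currency available: {selected.get('quote_currency')}"
--
--     # Multiple quote currencies - apply preference hierarchy
--     candidates = []
--
--     # Level 1: Exact preferred match
--     if preferred_quote:
--         candidates = [a for a in provider_assets if a.get('quote_currency') == preferred_quote]
--         if candidates:
--             selected = min(candidates, key=lambda a: a['symbol'])
--             skipped = [a for a in provider_assets if a != selected]
--             return selected, skipped, f"Selected preferred quote: {preferred_quote}"
--
--     # Level 2: USD fallback (any asset containing "USD")
--     candidates = [a for a in provider_assets if 'USD' in str(a.get('quote_currency', ''))]
--     if candidates:
--         selected = min(candidates, key=lambda a: a['symbol'])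
--         skipped = [a for a in provider_assets if a != selected]
--         return selected, skipped, f"Selected USD fallback: {selected.get('quote_currency')}"
--
--     # Level 3: No suitable match found - skip entirely
--     return None, provider_assets, "No suitable USD quote currency available"
-- ===== SOURCE B (Python) =====
-- def _select_crypto_asset_for_provider(provider_assets, preferred_quote):
--     """Select which crypto asset to map for a provider based on preferences."""
--     unique_quotes = set(a.get('quote_currency') for a in provider_assets if a.get('quote_currency'))
--     if len(unique_quotes) == 1:
--         selected = provider_assets[0]
--         return selected, [], f"Single quote currency available: {selected.get('quote_currency')}"
--
--     # One pass: assign each asset a priority (0 = preferred match, 1 = USD fallback, None = unusable)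
--     def priority(a):
--         q = a.get('quote_currency')
--         if preferred_quote and q == preferred_quote:
--             return 0
--         if 'USD' in str(a.get('quote_currency', '')):
--             return 1
--         return None
--
--     pris = [priority(a) for a in provider_assets]
--     qual = [p for p in pris if p is not None]
--     if not qual:
--         return None, provider_assets, "No suitable USD quote currency available"
--     best = min(qual)
--     selected = min((a for a, p in zip(provider_assets, pris) if p == best),
--                    key=lambda a: a['symbol'])
--     skipped = [a for a in provider_assets if a != selected]
--     if best == 0:
--         msg = f"Selected preferred quote: {preferred_quote}"
--     else:
--         msg = f"Selected USD fallback: {selected.get('quote_currency')}"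
--     return selected, skipped, msg
-- ===== Notes on version B (the rewrite author's own statement) =====
-- stated objective: alternative
-- what changed: A's three sequential candidate filters with early returns are replaced by a single pass assigning each asset a priority (0 = preferred quote, 1 = USD fallback), then one min over priorities and a min-by-symbol within the winning tier; the single-quote shortcut is kept verbatim.
import Mathlib
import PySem

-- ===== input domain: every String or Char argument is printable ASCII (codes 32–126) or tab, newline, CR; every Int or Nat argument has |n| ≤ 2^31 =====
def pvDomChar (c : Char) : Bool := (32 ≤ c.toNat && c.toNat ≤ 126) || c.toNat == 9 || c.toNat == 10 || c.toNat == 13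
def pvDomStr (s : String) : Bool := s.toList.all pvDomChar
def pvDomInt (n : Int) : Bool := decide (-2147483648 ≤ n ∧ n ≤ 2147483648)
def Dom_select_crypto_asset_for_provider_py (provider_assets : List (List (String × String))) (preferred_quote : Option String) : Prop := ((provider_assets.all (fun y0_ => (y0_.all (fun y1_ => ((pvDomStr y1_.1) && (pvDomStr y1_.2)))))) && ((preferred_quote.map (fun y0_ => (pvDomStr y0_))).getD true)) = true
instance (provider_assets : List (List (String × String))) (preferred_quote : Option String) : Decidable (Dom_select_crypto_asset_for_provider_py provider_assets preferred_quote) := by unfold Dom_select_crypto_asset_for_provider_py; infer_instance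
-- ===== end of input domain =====

-- B replaces A's three sequential candidate filters with one per-asset priority pass and a min over
-- (priority, symbol); same cost, different decomposition (objective: alternative). Return value only.

-- a.get(k): first-match association-list lookup
def dget? (d : List (String × String)) (k : String) : Option String :=
  (d.find? (fun kv => kv.1 == k)).map (fun kv => kv.2)

-- Shared low-level helpers (both Pythons use the same expressions: dict.get, dict !=, min(key=symbol)).
-- Python dict equality ignores insertion order: compare by lookups in both directions.
def pyDictEq (d1 d2 : List (String × String)) : Bool :=
  (d1.all (fun kv => dget? d2 kv.1 == dget? d1 kv.1)) &&
  (d2.all (fun kv => dget? d1 kv.1 == dget? d2 kv.1))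

-- a.get('quote_currency') rendered for an f-string (None prints as "None")
def qcStr (o : Option String) : String := match o with | some s => s | none => "None"

-- unique_quotes = set(a.get('quote_currency') for a in provider_assets if a.get('quote_currency'))
def uniqueQuotes (provider_assets : List (List (String × String))) : PySem.Set String :=
  PySem.Set.ofList (provider_assets.filterMap (fun a =>
    match dget? a "quote_currency" with
    | some q => if q = "" then none else some q
    | none => none))

-- min(candidates, key=lambda a: a['symbol']); none ↔ candidates empty; missing 'symbol' (a KeyError
-- in Python) is excluded by Pre_, the port totalises it with getD "".
def symKey (a : List (String × String)) : String := (dget? a "symbol").getD ""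
def minBySym : List (List (String × String)) → Option (List (String × String))
  | [] => none
  | c :: rest => some (rest.foldl (fun best a => if symKey a < symKey best then a else best) c)

-- ===== PORT A =====
-- Level 2 of A (USD fallback, then the level-3 give-up)
def pyA_usdFallback (provider_assets : List (List (String × String))) :
    (Option (List (String × String))) × (List (List (String × String))) × String :=
  let candidates := provider_assets.filter (fun a =>
    PySem.Str.isIn "USD" ((dget? a "quote_currency").getD ""))
  match minBySym candidates with
  | some selected =>
      (some selected, provider_assets.filter (fun a => !pyDictEq a selected),
       "Selected USD fallback: " ++ qcStr (dget? selected "quote_currency"))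
  | none => (none, provider_assets, "No suitable USD quote currency available")

def select_crypto_asset_for_provider_py (provider_assets : List (List (String × String))) (preferred_quote : Option String) : (Option (List (String × String))) × (List (List (String × String))) × String :=
  if (uniqueQuotes provider_assets).length = 1 then
    match provider_assets with
    | [] => (none, [], "")  -- unreachable: one unique quote forces a nonempty list
    | first :: _ =>
        (some first, [], "Single quote currency available: " ++ qcStr (dget? first "quote_currency"))
  else
    match preferred_quote with
    | some p =>
        if p = "" then pyA_usdFallback provider_assets
        else
          let candidates := provider_assets.filter (fun a => dget? a "quote_currency" == some p)
          match minBySym candidates with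
          | some selected =>
              (some selected, provider_assets.filter (fun a => !pyDictEq a selected),
               "Selected preferred quote: " ++ p)
          | none => pyA_usdFallback provider_assets
    | none => pyA_usdFallback provider_assets

-- ===== PORT B =====
def priorityB (preferred_quote : Option String) (a : List (String × String)) : Option Nat :=
  let q := dget? a "quote_currency"
  if (match preferred_quote with | some p => p ≠ "" && q == some p | none => false) then some 0
  else if PySem.Str.isIn "USD" (q.getD "") then some 1
  else none

def select_crypto_asset_for_provider_py_alt (provider_assets : List (List (String × String))) (preferred_quote : Option String) : (Option (List (String × String))) × (List (List (String × String))) × String :=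
  if (uniqueQuotes provider_assets).length = 1 then
    match provider_assets with
    | [] => (none, [], "")  -- unreachable, as in A
    | first :: _ =>
        (some first, [], "Single quote currency available: " ++ qcStr (dget? first "quote_currency"))
  else
    let pris := provider_assets.map (priorityB preferred_quote)
    let qual := pris.filterMap id
    match PySem.List.min? qual (fun x => x) with
    | none => (none, provider_assets, "No suitable USD quote currency available")
    | some best =>
        let tier := (provider_assets.zip pris).filterMap
          (fun ap => if ap.2 == some best then some ap.1 else none)
        match minBySym tier with
        | some selected =>
            (some selected, provider_assets.filter (fun a => !pyDictEq a selected),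
             if best = 0 then "Selected preferred quote: " ++ qcStr preferred_quote
             else "Selected USD fallback: " ++ qcStr (dget? selected "quote_currency"))
        | none => (none, provider_assets, "")  -- unreachable: some asset has priority best
  
-- ===== PRECONDITION & SPEC =====
-- Pre_ excludes exactly the inputs where Python's min(..., key=lambda a: a['symbol']) reaches an
-- asset without a 'symbol' key, on which A raises KeyError (so A returns no value there).
def Pre_select_crypto_asset_for_provider_py (provider_assets : List (List (String × String))) (preferred_quote : Option String) : Prop :=
  (uniqueQuotes provider_assets).length ≠ 1 →
    (let l1 := match preferred_quote with
      | some p => if p = "" then [] else provider_assets.filter (fun a => dget? a "quote_currency" == some p)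
      | none => []
     if l1 ≠ [] then ∀ a ∈ l1, (dget? a "symbol").isSome
     else ∀ a ∈ provider_assets.filter (fun a => PySem.Str.isIn "USD" ((dget? a "quote_currency").getD "")),
            (dget? a "symbol").isSome)
instance (provider_assets : List (List (String × String))) (preferred_quote : Option String) : Decidable (Pre_select_crypto_asset_for_provider_py provider_assets preferred_quote) := by unfold Pre_select_crypto_asset_for_provider_py; infer_instance

def pvWitness_select_crypto_asset_for_provider_py : (List (List (String × String))) × Option String :=
  ([[("quote_currency", "USDT"), ("symbol", "BTCUSDT")], [("quote_currency", "EUR"), ("symbol", "BTCEUR")]], some "USDT")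

def Spec_select_crypto_asset_for_provider_py (provider_assets : List (List (String × String))) (preferred_quote : Option String) (out : (Option (List (String × String))) × (List (List (String × String))) × String) : Prop := out = select_crypto_asset_for_provider_py_alt provider_assets preferred_quote
instance (provider_assets : List (List (String × String))) (preferred_quote : Option String) (out : (Option (List (String × String))) × (List (List (String × String))) × String) : Decidable (Spec_select_crypto_asset_for_provider_py provider_assets preferred_quote out) := by unfold Spec_select_crypto_asset_for_provider_py; infer_instance

-- ===== CLAIM (what is proved, stated in full; the proofs are below) =====
def Claim_equal_select_crypto_asset_for_provider_py : Prop := ∀ (provider_assets : List (List (String × String))) (preferred_quote : Option String), Dom_select_crypto_asset_for_provider_py provider_assets preferred_quote → Pre_select_crypto_asset_for_provider_py provider_assets preferred_quote → Spec_select_crypto_asset_for_provider_py provider_assets preferred_quote (select_crypto_asset_for_provider_py provider_assets preferred_quote)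

-- ===== LEMMAS AND PROOFS =====

theorem zip_map_filterMap_eq_filter (f : List (String × String) → Option Nat) (v : Option Nat)
    (pa : List (List (String × String))) :
    ((pa.zip (pa.map f)).filterMap (fun ap => if ap.2 == v then some ap.1 else none))
      = pa.filter (fun a => f a == v) := by
  induction pa with
  | nil => rfl
  | cons a t ih =>
      simp only [List.map_cons, List.zip_cons_cons, List.filterMap_cons, List.filter_cons,
        beq_iff_eq] at ih ⊢
      by_cases h : f a = v <;> simp [h, ih]

-- B's multi-quote pass, when no asset can get priority 0, agrees with A's USD fallback.
theorem B_usd (pa : List (List (String × String))) (pq : Option String)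
    (huq : ¬ (uniqueQuotes pa).length = 1)
    (hC0 : ∀ a ∈ pa, priorityB pq a
      = (if PySem.Str.isIn "USD" ((dget? a "quote_currency").getD "") then some 1 else none)) :
    select_crypto_asset_for_provider_py_alt pa pq = pyA_usdFallback pa := by
  have htier : (pa.zip (pa.map (priorityB pq))).filterMap
      (fun ap => if ap.2 == some 1 then some ap.1 else none)
      = pa.filter (fun a => PySem.Str.isIn "USD" ((dget? a "quote_currency").getD "")) := by
    rw [zip_map_filterMap_eq_filter]
    apply List.filter_congr
    intro a ha
    rw [hC0 a ha]
    cases hu : PySem.Str.isIn "USD" ((dget? a "quote_currency").getD "") <;> rfl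
  cases hl : pa.filter (fun a => PySem.Str.isIn "USD" ((dget? a "quote_currency").getD "")) with
  | nil =>
      have hnil : (pa.map (priorityB pq)).filterMap id = [] := by
        rw [List.filterMap_map]
        apply List.filterMap_eq_nil_iff.mpr
        intro a ha
        have hnu : PySem.Str.isIn "USD" ((dget? a "quote_currency").getD "") = false := by
          cases hu : PySem.Str.isIn "USD" ((dget? a "quote_currency").getD "") with
          | false => rfl
          | true =>
              exfalso
              have : a ∈ pa.filter (fun a => PySem.Str.isIn "USD" ((dget? a "quote_currency").getD "")) :=
                List.mem_filter.mpr ⟨ha, hu⟩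
              rw [hl] at this; simp at this
        rw [Function.comp_apply, id_eq, hC0 a ha, hnu]
        rfl
      simp only [select_crypto_asset_for_provider_py_alt, pyA_usdFallback, if_neg huq, hnil, hl]
      simp [PySem.List.min?, minBySym]
  | cons c r =>
      have hc : c ∈ pa.filter (fun a => PySem.Str.isIn "USD" ((dget? a "quote_currency").getD "")) := by
        rw [hl]; exact List.mem_cons_self
      have h1mem : (1:Nat) ∈ (pa.map (priorityB pq)).filterMap id := by
        rw [List.filterMap_map, List.mem_filterMap]
        refine ⟨c, (List.mem_filter.mp hc).1, ?_⟩
        rw [Function.comp_apply, id_eq, hC0 c (List.mem_filter.mp hc).1,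
          (List.mem_filter.mp hc).2]
        rfl
      have hone : ∀ q ∈ (pa.map (priorityB pq)).filterMap id, q = 1 := by
        intro q hq
        rw [List.filterMap_map, List.mem_filterMap] at hq
        obtain ⟨a, ha, hfa⟩ := hq
        rw [Function.comp_apply, id_eq, hC0 a ha] at hfa
        cases hu : PySem.Str.isIn "USD" ((dget? a "quote_currency").getD "") <;>
          rw [hu] at hfa <;> simp at hfa
        omega
      have hmin : PySem.List.min? ((pa.map (priorityB pq)).filterMap id) (fun x => x) = some 1 := by
        cases h : PySem.List.min? ((pa.map (priorityB pq)).filterMap id) (fun x => x) with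
        | none =>
            rw [PySem.List.min?_eq_none_iff] at h
            rw [h] at h1mem; simp at h1mem
        | some m => rw [hone m (PySem.List.min?_mem h)]
      simp only [select_crypto_asset_for_provider_py_alt, pyA_usdFallback, if_neg huq, hmin, htier, hl]
      simp [minBySym]

-- ===== VERDICT (by name: the statement is the Claim_ definition above) =====
theorem select_crypto_asset_for_provider_py_spec : Claim_equal_select_crypto_asset_for_provider_py := by
  intro pa pq _ _
  unfold Spec_select_crypto_asset_for_provider_py
  by_cases huq : (uniqueQuotes pa).length = 1
  · simp only [select_crypto_asset_for_provider_py, select_crypto_asset_for_provider_py_alt,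
      if_pos huq]
  · cases pq with
    | none =>
        rw [B_usd pa none huq (fun a _ => rfl)]
        simp only [select_crypto_asset_for_provider_py, if_neg huq]
    | some p =>
        by_cases hp : p = ""
        · subst hp
          rw [B_usd pa (some "") huq (fun a _ => by simp [priorityB])]
          simp only [select_crypto_asset_for_provider_py, if_neg huq]
          simp
        · by_cases hz : ∃ a ∈ pa, dget? a "quote_currency" = some p
          · -- level-1 winner exists
            obtain ⟨a0, ha0, hdq⟩ := hz
            have h0mem : (0:Nat) ∈ (pa.map (priorityB (some p))).filterMap id := by
              rw [List.filterMap_map, List.mem_filterMap]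
              exact ⟨a0, ha0, by simp [priorityB, hp, hdq]⟩
            have hmin : PySem.List.min? ((pa.map (priorityB (some p))).filterMap id) (fun x => x)
                = some 0 := by
              cases h : PySem.List.min? ((pa.map (priorityB (some p))).filterMap id) (fun x => x) with
              | none =>
                  rw [PySem.List.min?_eq_none_iff] at h
                  rw [h] at h0mem; simp at h0mem
              | some m =>
                  have hle := PySem.List.min?_isMin h 0 h0mem
                  simp at hle
                  rw [hle]
            have htier : (pa.zip (pa.map (priorityB (some p)))).filterMap
                (fun ap => if ap.2 == some 0 then some ap.1 else none)
                = pa.filter (fun a => dget? a "quote_currency" == some p) := by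
              rw [zip_map_filterMap_eq_filter]
              apply List.filter_congr
              intro a _
              by_cases h : dget? a "quote_currency" = some p
              · simp [priorityB, hp, h]
              · by_cases hu : PySem.Str.isIn "USD" ((dget? a "quote_currency").getD "") <;>
                  simp [priorityB, hp, h, hu]
            cases hl : pa.filter (fun a => dget? a "quote_currency" == some p) with
            | nil =>
                exfalso
                have : a0 ∈ pa.filter (fun a => dget? a "quote_currency" == some p) :=
                  List.mem_filter.mpr ⟨ha0, by simp [hdq]⟩
                rw [hl] at this; simp at this
            | cons c r =>
                simp only [select_crypto_asset_for_provider_py,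
                  select_crypto_asset_for_provider_py_alt, if_neg huq, if_neg hp, hmin, htier, hl]
                simp [minBySym, qcStr]
          · -- no exact match: A falls through to the USD fallback
            rw [not_exists] at hz
            simp only [not_and] at hz
            have hC0 : ∀ a ∈ pa, priorityB (some p) a
                = (if PySem.Str.isIn "USD" ((dget? a "quote_currency").getD "") then some 1 else none) := by
              intro a ha
              simp [priorityB, hz a ha]
            rw [B_usd pa (some p) huq hC0]
            have hl1 : pa.filter (fun a => dget? a "quote_currency" == some p) = [] := by
              apply List.filter_eq_nil_iff.mpr
              intro a ha
              simp [hz a ha]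
            simp only [select_crypto_asset_for_provider_py, if_neg huq, if_neg hp, hl1]
            simp [minBySym]
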